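-- pv_equiv track=rewrite | github.com/danmccabe00/CA117 | lab_061/q3_061.py | count
-- ===== SOURCE A (Python) =====
-- def count(l):
--    dig = 0
--    big = 0
--    small = 0
--    other = 0
--    for c in l:
--       if c.isdigit():
--          dig = 1
--       elif c.islower():
--          small = 1
--       elif c.isupper():
--          big = 1
--       elif not c.isalnum():
--          other = 1
--    tot = dig + big + small + other
--    return tot
-- ===== SOURCE B (Python) =====
-- def count(l):
--     dig = any(c.isdigit() for c in l)
--     small = any(c.islower() for c in l)
--     big = any(c.isupper() for c in l)
--     other = any(not c.isalnum() for c in l)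
--     return dig + small + big + other
-- ===== Notes on version B (the rewrite author's own statement) =====
-- stated objective: idiomatic
-- what changed: Replaces the single flag-setting elif-chain loop over mutable counters with four independent any() scans, one per mutually exclusive character category, summed directly.
import Mathlib
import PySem

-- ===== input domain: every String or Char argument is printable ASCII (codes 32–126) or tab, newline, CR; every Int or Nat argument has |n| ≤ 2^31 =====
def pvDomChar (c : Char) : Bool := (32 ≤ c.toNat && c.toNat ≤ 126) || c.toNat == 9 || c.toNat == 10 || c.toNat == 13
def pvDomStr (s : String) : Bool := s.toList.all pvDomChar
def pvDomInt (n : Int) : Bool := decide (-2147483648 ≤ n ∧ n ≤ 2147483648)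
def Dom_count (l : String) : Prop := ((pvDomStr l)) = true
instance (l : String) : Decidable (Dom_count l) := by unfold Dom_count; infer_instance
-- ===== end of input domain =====

-- B replaces A's single flag-setting elif-chain loop with four independent any-scans, one per category (idiomatic; same O(n) cost).

-- ===== PORT A =====
-- one step of A's for-loop over (dig, big, small, other)
def countStep (st : Int × Int × Int × Int) (c : Char) : Int × Int × Int × Int :=
  if PySem.Chars.isdigit c then (1, st.2.1, st.2.2.1, st.2.2.2)
  else if PySem.Chars.islower c then (st.1, st.2.1, 1, st.2.2.2)
  else if PySem.Chars.isupper c then (st.1, 1, st.2.2.1, st.2.2.2)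
  else if !PySem.Chars.isalnum c then (st.1, st.2.1, st.2.2.1, 1)
  else st

def count (l : String) : Int :=
  let st := l.toList.foldl countStep (0, 0, 0, 0)
  st.1 + st.2.1 + st.2.2.1 + st.2.2.2

-- ===== PORT B =====
def count_alt (l : String) : Int :=
  let dig := l.toList.any PySem.Chars.isdigit
  let small := l.toList.any PySem.Chars.islower
  let big := l.toList.any PySem.Chars.isupper
  let other := l.toList.any (fun c => !PySem.Chars.isalnum c)
  (if dig then (1 : Int) else 0) + (if small then 1 else 0)
    + (if big then 1 else 0) + (if other then 1 else 0)

-- ===== PRECONDITION & SPEC =====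
def Spec_count (l : String) (out : Int) : Prop := out = count_alt l
instance (l : String) (out : Int) : Decidable (Spec_count l out) := by unfold Spec_count; infer_instance

-- ===== CLAIM (what is proved, stated in full; the proofs are below) =====
def Claim_equal_count : Prop := ∀ (l : String), Dom_count l → Spec_count l (count l)

-- ===== LEMMAS AND PROOFS =====

lemma digit_not_lower (c : Char) (h : PySem.Chars.isdigit c = true) :
    PySem.Chars.islower c = false := by
  rw [Bool.eq_false_iff]
  intro h'
  simp only [PySem.Chars.isdigit, PySem.Chars.islower, Bool.and_eq_true, decide_eq_true_eq,
    Char.le_def, UInt32.le_iff_toNat_le] at h h'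
  have e0 : '0'.val.toNat = 48 := rfl
  have e9 : '9'.val.toNat = 57 := rfl
  have ea : 'a'.val.toNat = 97 := rfl
  have ez : 'z'.val.toNat = 122 := rfl
  have eA : 'A'.val.toNat = 65 := rfl
  have eZ : 'Z'.val.toNat = 90 := rfl
  omega

lemma digit_not_upper (c : Char) (h : PySem.Chars.isdigit c = true) :
    PySem.Chars.isupper c = false := by
  rw [Bool.eq_false_iff]
  intro h'
  simp only [PySem.Chars.isdigit, PySem.Chars.isupper, Bool.and_eq_true, decide_eq_true_eq,
    Char.le_def, UInt32.le_iff_toNat_le] at h h'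
  have e0 : '0'.val.toNat = 48 := rfl
  have e9 : '9'.val.toNat = 57 := rfl
  have ea : 'a'.val.toNat = 97 := rfl
  have ez : 'z'.val.toNat = 122 := rfl
  have eA : 'A'.val.toNat = 65 := rfl
  have eZ : 'Z'.val.toNat = 90 := rfl
  omega

lemma lower_not_upper (c : Char) (h : PySem.Chars.islower c = true) :
    PySem.Chars.isupper c = false := by
  rw [Bool.eq_false_iff]
  intro h'
  simp only [PySem.Chars.islower, PySem.Chars.isupper, Bool.and_eq_true, decide_eq_true_eq,
    Char.le_def, UInt32.le_iff_toNat_le] at h h'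
  have e0 : '0'.val.toNat = 48 := rfl
  have e9 : '9'.val.toNat = 57 := rfl
  have ea : 'a'.val.toNat = 97 := rfl
  have ez : 'z'.val.toNat = 122 := rfl
  have eA : 'A'.val.toNat = 65 := rfl
  have eZ : 'Z'.val.toNat = 90 := rfl
  omega

lemma alnum_expand (c : Char) :
    PySem.Chars.isalnum c
      = (PySem.Chars.isupper c || PySem.Chars.islower c || PySem.Chars.isdigit c) := by
  simp [PySem.Chars.isalnum, PySem.Chars.isalpha]

lemma foldA (cs : List Char) (d b s o : Int) :
    cs.foldl countStep (d, b, s, o) =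
      ((if cs.any PySem.Chars.isdigit then 1 else d),
       (if cs.any PySem.Chars.isupper then 1 else b),
       (if cs.any PySem.Chars.islower then 1 else s),
       (if cs.any (fun c => !PySem.Chars.isalnum c) then 1 else o)) := by
  induction cs generalizing d b s o with
  | nil => simp
  | cons c cs ih =>
    by_cases hd : PySem.Chars.isdigit c = true
    · have h1 := digit_not_lower c hd
      have h2 := digit_not_upper c hd
      simp [countStep, hd, h1, h2, ih, alnum_expand]
    · by_cases hl : PySem.Chars.islower c = true
      · have h2 := lower_not_upper c hl
        simp [countStep, hd, hl, h2, ih, alnum_expand]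
      · by_cases hu : PySem.Chars.isupper c = true
        · simp [countStep, hd, hl, hu, ih, alnum_expand]
        · simp [countStep, hd, hl, hu, ih, alnum_expand]

-- ===== VERDICT (by name: the statement is the Claim_ definition above) =====
theorem count_spec : Claim_equal_count := by
  intro l _
  simp only [Spec_count, count, count_alt]
  rw [foldA]
  split_ifs <;> norm_num
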